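-- pv_equiv track=rewrite | github.com/Darkcdm/EveryBodyCodes | Quest_1/Part_1/code.py | getHealthPotions
-- ===== SOURCE A (Python) =====
-- def getHealthPotions(input:str):
--     sum = 0
--     for char in input:
--         if char == "A":
--             sum += 0
--             continue
--
--         if char == "B":
--             sum += 1
--             continue
--
--         if char == "C":
--             sum += 3
--             continue
--
--     return sum
-- ===== SOURCE B (Python) =====
-- WEIGHT = {"B": 1, "C": 3}
--
-- def getHealthPotions(input: str):
--     # Divide and conquer: recursively split the index range in half and add
--     # the two halves' totals; a single character is looked up in WEIGHT.
--     def go(lo, hi):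
--         if hi - lo == 0:
--             return 0
--         if hi - lo == 1:
--             return WEIGHT.get(input[lo], 0)
--         mid = (lo + hi) // 2
--         return go(lo, mid) + go(mid, hi)
--     return go(0, len(input))
-- ===== Notes on version B (the rewrite author's own statement) =====
-- stated objective: alternative
-- what changed: Replaces A's linear accumulating if-chain loop with a divide-and-conquer recursion that splits the index range in half, sums the two halves, and resolves single characters via a weight table.
import Mathlib
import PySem

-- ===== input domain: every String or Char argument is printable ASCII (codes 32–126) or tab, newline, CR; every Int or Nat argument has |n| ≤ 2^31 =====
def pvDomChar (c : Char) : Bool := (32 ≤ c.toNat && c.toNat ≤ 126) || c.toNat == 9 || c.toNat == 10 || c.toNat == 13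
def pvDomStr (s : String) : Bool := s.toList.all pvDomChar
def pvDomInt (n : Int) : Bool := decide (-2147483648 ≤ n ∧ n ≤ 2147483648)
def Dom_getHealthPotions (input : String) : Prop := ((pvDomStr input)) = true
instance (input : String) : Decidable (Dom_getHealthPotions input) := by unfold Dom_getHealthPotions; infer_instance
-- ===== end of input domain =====

-- B replaces A's linear accumulating if-chain loop with a divide-and-conquer
-- recursion over index ranges, resolving a single character via a weight table
-- (objective: alternative).

-- ===== PORT A =====
def getHealthPotions (input : String) : Int :=
  input.toList.foldl
    (fun sum char =>
      if char == 'A' then sum + 0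
      else if char == 'B' then sum + 1
      else if char == 'C' then sum + 3
      else sum) 0

-- ===== PORT B =====
-- WEIGHT = {"B": 1, "C": 3}
def pvWeight : PySem.Dict Char Int := PySem.Dict.ofList [('B', 1), ('C', 3)]

-- inner 'go(lo, hi)'; 'input[lo]' is ported with getD: go only indexes with
-- lo < hi ≤ len(input), so the index is always in range and getD is exact.
def pvGo (l : List Char) (lo hi : Nat) : Int :=
  if hi - lo = 0 then 0
  else if hi - lo = 1 then pvWeight.getD (l.getD lo ' ') 0
  else
    let mid := (lo + hi) / 2
    pvGo l lo mid + pvGo l mid hi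
termination_by hi - lo
decreasing_by all_goals omega

def getHealthPotions_alt (input : String) : Int :=
  pvGo input.toList 0 input.toList.length

-- ===== PRECONDITION & SPEC =====
def Spec_getHealthPotions (input : String) (out : Int) : Prop := out = getHealthPotions_alt input
instance (input : String) (out : Int) : Decidable (Spec_getHealthPotions input out) := by unfold Spec_getHealthPotions; infer_instance

-- ===== CLAIM (what is proved, stated in full; the proofs are below) =====
def Claim_equal_getHealthPotions : Prop := ∀ (input : String), Dom_getHealthPotions input → Spec_getHealthPotions input (getHealthPotions input)

-- ===== LEMMAS AND PROOFS =====
theorem pvWeight_getD (c : Char) :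
    pvWeight.getD c 0 = if c = 'B' then 1 else if c = 'C' then 3 else 0 := by
  by_cases hB : c = 'B'
  · subst hB; decide
  by_cases hC : c = 'C'
  · subst hC; decide
  have hB' : ('B' == c) = false := beq_eq_false_iff_ne.mpr (Ne.symm hB)
  have hC' : ('C' == c) = false := beq_eq_false_iff_ne.mpr (Ne.symm hC)
  simp [pvWeight, PySem.Dict.getD, PySem.Dict.get?, PySem.Dict.ofList, PySem.Dict.empty,
    PySem.Dict.update, PySem.Dict.insert, PySem.Dict.contains, List.find?, hB, hC, hB', hC']

theorem getHealthPotions_foldl_eq (l : List Char) (a : Int) :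
    l.foldl
      (fun sum char =>
        if char == 'A' then sum + 0
        else if char == 'B' then sum + 1
        else if char == 'C' then sum + 3
        else sum) a
    = a + l.count 'B' + 3 * l.count 'C' := by
  induction l generalizing a with
  | nil => simp
  | cons c t ih =>
    simp only [List.foldl_cons, List.count_cons, ih]
    by_cases hA : c = 'A' <;> by_cases hB : c = 'B' <;> by_cases hC : c = 'C' <;>
      simp_all <;> ring

-- the divide-and-conquer recursion computes the weighted count of the segment [lo, hi)
theorem pvGo_eq (l : List Char) (lo hi : Nat) (hhi : hi ≤ l.length) :
    pvGo l lo hi = ((l.drop lo).take (hi - lo)).count 'B'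
      + 3 * ((l.drop lo).take (hi - lo)).count 'C' := by
  induction lo, hi using pvGo.induct with
  | case1 lo hi h =>
    rw [pvGo]
    simp [h]
  | case2 lo hi h0 h1 =>
    rw [pvGo]
    simp only [h1, if_pos]
    have hlo : lo < l.length := by omega
    have hdrop : l.drop lo = l[lo] :: l.drop (lo + 1) := List.drop_eq_getElem_cons hlo
    rw [hdrop]
    simp only [List.take_succ_cons, List.take_zero, List.count_cons, List.count_nil,
      List.getD_eq_getElem?_getD, l.getElem?_eq_getElem hlo, Option.getD_some, pvWeight_getD]
    by_cases hB : l[lo] = 'B' <;> by_cases hC : l[lo] = 'C' <;> simp_all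
  | case3 lo hi h0 h1 mid ih1 ih2 =>
    rw [pvGo]
    simp only [h0, h1]
    have hm1 : lo ≤ mid := by omega
    have hm2 : mid ≤ hi := by omega
    rw [show pvGo l lo ((lo + hi) / 2) = pvGo l lo mid from rfl,
        show pvGo l ((lo + hi) / 2) hi = pvGo l mid hi from rfl,
        ih1 (by omega), ih2 hhi]
    have hseg : (l.drop lo).take (hi - lo)
        = (l.drop lo).take (mid - lo) ++ ((l.drop mid).take (hi - mid)) := by
      rw [show hi - lo = (mid - lo) + (hi - mid) from by omega, List.take_add,
        List.drop_drop, show lo + (mid - lo) = mid from by omega]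
    rw [hseg]
    simp only [List.count_append]
    push_cast
    ring

-- ===== VERDICT (by name: the statement is the Claim_ definition above) =====
theorem getHealthPotions_spec : Claim_equal_getHealthPotions := by
  intro input _
  unfold Spec_getHealthPotions getHealthPotions getHealthPotions_alt
  rw [getHealthPotions_foldl_eq, pvGo_eq _ _ _ (le_refl _)]
  simp only [List.drop_zero, Nat.sub_zero, List.take_length]
  ring
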